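-- pv_equiv track=rewrite | github.com/GitMonsters/octotetrahedral-agi | arc-puzzle-catalog/re-arc/solves/5ceb2152/solver.py | transform
-- ===== SOURCE A (Python) =====
-- def transform(input_grid):
--     import copy
--     from collections import Counter
--
--     grid = copy.deepcopy(input_grid)
--     rows = len(grid)
--     cols = len(grid[0])
--
--     # Find background color (most common)
--     color_counts = Counter()
--     for r in range(rows):
--         for c in range(cols):
--             color_counts[grid[r][c]] += 1
--     bg_color = color_counts.most_common(1)[0][0]
--
--     # Find foreground color
--     fg_color = [c for c in color_counts if c != bg_color][0]
--
--     # Collect all foreground cells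
--     fg_cells = set()
--     for r in range(rows):
--         for c in range(cols):
--             if grid[r][c] == fg_color:
--                 fg_cells.add((r, c))
--
--     # Get unique columns and split into two groups by largest gap
--     all_cols = sorted(set(c for _, c in fg_cells))
--     max_gap = -1
--     split_idx = 0
--     for i in range(len(all_cols) - 1):
--         gap = all_cols[i + 1] - all_cols[i]
--         if gap > max_gap:
--             max_gap = gap
--             split_idx = i
--
--     left_col_set = set(all_cols[:split_idx + 1])
--     right_col_set = set(all_cols[split_idx + 1:])
--
--     left_cells = [(r, c) for r, c in fg_cells if c in left_col_set]
--     right_cells = [(r, c) for r, c in fg_cells if c in right_col_set]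
--
--     left_max_row = max(r for r, _ in left_cells)
--     right_max_row = max(r for r, _ in right_cells)
--     left_anchor = min(left_col_set)
--     right_anchor = min(right_col_set)
--
--     # Build row -> list of column offsets
--     def build_row_offsets(cells, anchor):
--         mapping = {}
--         for r, c in cells:
--             mapping.setdefault(r, []).append(c - anchor)
--         return mapping
--
--     if left_max_row < right_max_row:
--         longer_offsets = build_row_offsets(right_cells, right_anchor)
--         shorter_anchor = left_anchor
--         ext_start, ext_end = left_max_row + 1, right_max_row
--     elif right_max_row < left_max_row:
--         longer_offsets = build_row_offsets(left_cells, left_anchor)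
--         shorter_anchor = right_anchor
--         ext_start, ext_end = right_max_row + 1, left_max_row
--     else:
--         return grid
--
--     for r in range(ext_start, ext_end + 1):
--         if r in longer_offsets:
--             for offset in longer_offsets[r]:
--                 new_c = shorter_anchor + offset
--                 if 0 <= new_c < cols:
--                     grid[r][new_c] = 9
--
--     return grid
-- ===== SOURCE B (Python) =====
-- def transform(input_grid):
--     from collections import Counter
--
--     rows = len(input_grid)
--     cols = len(input_grid[0])
--     counts = Counter(v for row in input_grid for v in row)
--     bg = counts.most_common(1)[0][0]
--     fg = next(v for v in counts if v != bg)
--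
--     # column-major sweep: for each column, the deepest foreground row (None if empty)
--     deepest = [max((r for r in range(rows) if input_grid[r][c] == fg), default=None)
--                for c in range(cols)]
--     fgcols = [c for c in range(cols) if deepest[c] is not None]
--
--     # the two columns flanking the widest gap (first widest wins: max keeps the earliest)
--     lcol, rcol = max(zip(fgcols, fgcols[1:]), key=lambda p: p[1] - p[0])
--
--     left_max = max(deepest[c] for c in fgcols if c <= lcol)
--     right_max = max(deepest[c] for c in fgcols if c > lcol)
--     if left_max == right_max:
--         return [list(row) for row in input_grid]
--
--     if left_max < right_max:
--         lo, hi, delta = left_max, right_max, fgcols[0] - rcol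
--
--         def src(c):
--             return c > lcol
--     else:
--         lo, hi, delta = right_max, left_max, rcol - fgcols[0]
--
--         def src(c):
--             return c <= lcol
--
--     # pull-style rebuild: a cell turns 9 when the cell delta to its left/right
--     # is a foreground cell of the longer arm and the row lies in the extension band
--     return [[9 if 0 <= c - delta < cols and src(c - delta) and row[c - delta] == fg else v
--              for c, v in enumerate(row)] if lo < r <= hi else list(row)
--             for r, row in enumerate(input_grid)]
-- ===== Notes on version B (the rewrite author's own statement) =====
-- stated objective: alternative
-- what changed: Replaces A's fg-cell set, sorted column set, row->offset-list dict and in-place row-range write loop by a column-major sweep (a per-column deepest-fg-row array, fg columns read off ascending without sorting, the gap split taken as a max over adjacent column pairs, arm depths as maxes of the per-column array) and a pull-style functional rebuild in which each output cell inspects the source cell shifted by delta instead of a pushed set of write targets.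
-- outside the precondition, e.g. on transform([[7, 5], [5, 7, 5]]): A returns [[7, 5], [5, 9, 5]], B returns [[7, 5], [9, 7, 5]]
import Mathlib
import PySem

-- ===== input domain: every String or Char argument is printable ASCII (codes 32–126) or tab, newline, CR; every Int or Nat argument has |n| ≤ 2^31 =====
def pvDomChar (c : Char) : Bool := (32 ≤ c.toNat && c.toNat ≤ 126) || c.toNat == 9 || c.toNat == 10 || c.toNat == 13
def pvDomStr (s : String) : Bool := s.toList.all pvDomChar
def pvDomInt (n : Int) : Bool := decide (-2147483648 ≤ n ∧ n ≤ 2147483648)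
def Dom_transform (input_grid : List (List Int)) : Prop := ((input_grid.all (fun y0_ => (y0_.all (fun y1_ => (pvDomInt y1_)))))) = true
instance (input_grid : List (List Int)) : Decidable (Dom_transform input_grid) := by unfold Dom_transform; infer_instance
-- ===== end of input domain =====

-- B replaces A's fg-cell set, sorted column list, row->offsets dict and in-place write loop by a
-- column-major sweep (per-column deepest fg row, columns read off ascending, gap split as a max
-- over adjacent column pairs) and a pull-style rebuild where each output cell inspects the source
-- cell shifted by delta (return-value equivalence; A deep-copies, so neither mutates its argument).


-- ===== PORT A =====
-- grid[r][c] = v (A only executes it with indices that are in range on inputs admitted by Pre_)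
def pySetCell (g : List (List Int)) (r c : Int) (v : Int) : List (List Int) :=
  g.set r.toNat ((g.getD r.toNat []).set c.toNat v)

-- the final 'for r in range(ext_start, ext_end+1)' extension loop of A
def extendLoop (g : List (List Int)) (cols : Int) (offs : PySem.Dict Int (List Int))
    (anchor lo hi : Int) : List (List Int) :=
  (PySem.List.pyRange lo (hi + 1)).foldl (fun g r =>
    if offs.contains r then
      (offs.getD r []).foldl (fun g off =>
        let newC := anchor + off
        if 0 ≤ newC ∧ newC < cols then pySetCell g r newC 9 else g) g
    else g) g

def transform (input_grid : List (List Int)) : List (List Int) :=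
  let grid := input_grid
  let rows : Int := (grid.length : Int)
  let cols : Int := ((PySem.List.pyGetD grid 0 []).length : Int)
  let colorCounts : PySem.Dict Int Int :=
    (PySem.List.pyRange 0 rows).foldl (fun d r =>
      (PySem.List.pyRange 0 cols).foldl (fun d c =>
        d.modify (PySem.List.pyGetD (PySem.List.pyGetD grid r []) c 0) 0 (· + 1)) d)
      PySem.Dict.empty
  let bgColor : Int :=
    (PySem.List.pyGetD (PySem.List.sorted colorCounts.items (fun p => p.2) true) 0 (0, 0)).1
  let fgColor : Int :=
    PySem.List.pyGetD (colorCounts.keys.filter (fun c => decide (c ≠ bgColor))) 0 0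
  let fgCells : PySem.Set (Int × Int) :=
    (PySem.List.pyRange 0 rows).foldl (fun s r =>
      (PySem.List.pyRange 0 cols).foldl (fun s c =>
        if PySem.List.pyGetD (PySem.List.pyGetD grid r []) c 0 = fgColor then s.add (r, c) else s) s)
      PySem.Set.empty
  let allCols : List Int :=
    PySem.List.sorted (PySem.Set.ofList (fgCells.map (·.2))) (fun x => x) false
  let ms : Int × Int :=
    (PySem.List.pyRange 0 ((allCols.length : Int) - 1)).foldl (fun ms i =>
      let gap := PySem.List.pyGetD allCols (i + 1) 0 - PySem.List.pyGetD allCols i 0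
      if gap > ms.1 then (gap, i) else ms) (-1, 0)
  let splitIdx := ms.2
  let leftColSet := PySem.Set.ofList (PySem.List.slice allCols none (some (splitIdx + 1)))
  let rightColSet := PySem.Set.ofList (PySem.List.slice allCols (some (splitIdx + 1)) none)
  let leftCells := fgCells.filter (fun p => leftColSet.contains p.2)
  let rightCells := fgCells.filter (fun p => rightColSet.contains p.2)
  let leftMaxRow := (PySem.List.max? (leftCells.map (·.1)) (fun x => x)).getD 0
  let rightMaxRow := (PySem.List.max? (rightCells.map (·.1)) (fun x => x)).getD 0
  let leftAnchor := (PySem.List.min? (leftColSet : List Int) (fun x => x)).getD 0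
  let rightAnchor := (PySem.List.min? (rightColSet : List Int) (fun x => x)).getD 0
  let buildRowOffsets : List (Int × Int) → Int → PySem.Dict Int (List Int) := fun cells anchor =>
    cells.foldl (fun m p => m.modify p.1 [] (fun l => l ++ [p.2 - anchor])) PySem.Dict.empty
  if leftMaxRow < rightMaxRow then
    extendLoop grid cols (buildRowOffsets rightCells rightAnchor) leftAnchor (leftMaxRow + 1) rightMaxRow
  else if rightMaxRow < leftMaxRow then
    extendLoop grid cols (buildRowOffsets leftCells leftAnchor) rightAnchor (rightMaxRow + 1) leftMaxRow
  else grid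

-- ===== PORT B =====
-- bg = Counter(flat).most_common(1)[0][0]
def pvBg (g : List (List Int)) : Int :=
  (PySem.List.pyGetD (PySem.List.sorted (PySem.Dict.counter g.flatten).items (fun p => p.2) true) 0 (0, 0)).1

-- fg = next(v for v in counts if v != bg)
def pvFg (g : List (List Int)) : Int :=
  ((PySem.Dict.counter g.flatten).keys.find? (fun v => decide (v ≠ pvBg g))).getD 0

-- deepest[c] = max((r for r in range(rows) if input_grid[r][c] == fg), default=None)
-- (max(gen, default=None) is exactly PySem.List.max?: none on an empty generator)
def pvDeepest (g : List (List Int)) (fg rows c : Int) : Option Int :=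
  PySem.List.max? ((PySem.List.pyRange 0 rows).filter
    (fun r => PySem.List.pyGetD (PySem.List.pyGetD g r []) c 0 == fg)) (fun x => x)

def transform_alt (input_grid : List (List Int)) : List (List Int) :=
  let rows : Int := (input_grid.length : Int)
  let cols : Int := ((PySem.List.pyGetD input_grid 0 []).length : Int)
  let bg := pvBg input_grid
  let fg := pvFg input_grid
  let fgcols : List Int :=
    (PySem.List.pyRange 0 cols).filter (fun c => (pvDeepest input_grid fg rows c).isSome)
  -- lcol, rcol = max(zip(fgcols, fgcols[1:]), key=lambda p: p[1] - p[0])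
  let pair : Int × Int :=
    (PySem.List.max? (List.zip fgcols (PySem.List.slice fgcols (some 1) none))
      (fun p => p.2 - p.1)).getD (0, 0)
  let lcol := pair.1
  let rcol := pair.2
  let leftMax : Int :=
    (PySem.List.max? ((fgcols.filter (fun c => decide (c ≤ lcol))).map
      (fun c => (pvDeepest input_grid fg rows c).getD 0)) (fun x => x)).getD 0
  let rightMax : Int :=
    (PySem.List.max? ((fgcols.filter (fun c => decide (lcol < c))).map
      (fun c => (pvDeepest input_grid fg rows c).getD 0)) (fun x => x)).getD 0
  if leftMax = rightMax then input_grid.map (fun row => row)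
  else
    let lhd : Int × Int × Int × Bool :=
      if leftMax < rightMax then
        (leftMax, rightMax, PySem.List.pyGetD fgcols 0 0 - rcol, true)
      else
        (rightMax, leftMax, rcol - PySem.List.pyGetD fgcols 0 0, false)
    let lo := lhd.1
    let hi := lhd.2.1
    let delta := lhd.2.2.1
    let srcOk : Int → Bool := fun c => if lhd.2.2.2 then decide (lcol < c) else decide (c ≤ lcol)
    (PySem.List.enumerate input_grid).map (fun rr =>
      if decide (lo < rr.1) && decide (rr.1 ≤ hi) then
        (PySem.List.enumerate rr.2).map (fun cv =>
          if decide (0 ≤ cv.1 - delta) && decide (cv.1 - delta < cols) && srcOk (cv.1 - delta)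
             && (PySem.List.pyGetD rr.2 (cv.1 - delta) 0 == fg)
          then 9 else cv.2)
      else rr.2)

-- ===== PRECONDITION & SPEC =====
-- helpers the precondition (and the proofs) quantify with: the fg cells and distinct fg columns
def pvCells (g : List (List Int)) : List (Int × Int) :=
  (PySem.List.enumerate g).flatMap (fun rr =>
    ((PySem.List.enumerate rr.2).filter (fun cv => cv.2 == pvFg g)).map (fun cv => (rr.1, cv.1)))

def pvCols (g : List (List Int)) : List Int :=
  PySem.List.sorted (PySem.Set.ofList ((pvCells g).map (·.2))) (fun x => x) false

-- Pre_ excludes inputs where A raises (empty grid, empty first row, a single colour, the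
-- foreground confined to one column, a row shorter than row 0) and — the only narrowing —
-- ragged grids with rows LONGER than row 0, on which A returns but silently ignores every cell
-- beyond the first row's width: an artefact of indexing by len(grid[0]) on non-grid input.
def Pre_transform (input_grid : List (List Int)) : Prop :=
  input_grid ≠ [] ∧
  (∀ row ∈ input_grid, row.length = (input_grid.headD []).length) ∧
  input_grid.headD [] ≠ [] ∧
  2 ≤ (PySem.Set.ofList input_grid.flatten).length ∧
  2 ≤ (pvCols input_grid).length
instance (input_grid : List (List Int)) : Decidable (Pre_transform input_grid) := by
  unfold Pre_transform; infer_instance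

def pvWitness_transform : List (List Int) :=
  [[0, 0, 0, 0, 0], [3, 0, 0, 0, 3], [3, 0, 0, 0, 3], [0, 0, 0, 0, 3]]

def Spec_transform (input_grid : List (List Int)) (out : List (List Int)) : Prop :=
  out = transform_alt input_grid
instance (input_grid : List (List Int)) (out : List (List Int)) : Decidable (Spec_transform input_grid out) := by
  unfold Spec_transform; infer_instance

-- ===== CLAIM (what is proved, stated in full; the proofs are below) =====
def Claim_equal_transform : Prop :=
  ∀ (input_grid : List (List Int)), Dom_transform input_grid → Pre_transform input_grid →
    Spec_transform input_grid (transform input_grid)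

-- ===== LEMMAS AND PROOFS =====

-- small list utilities

theorem pv_pyGetD_zero {α : Type} (l : List α) (d : α) :
    PySem.List.pyGetD l 0 d = l.headD d := by
  cases l <;> simp [PySem.List.pyGetD, PySem.List.pyGet?, PySem.List.pyIdx?]

theorem pv_filter_head_find {α : Type} (l : List α) (p : α → Bool) (d : α) :
    PySem.List.pyGetD (l.filter p) 0 d = (l.find? p).getD d := by
  induction l with
  | nil => simp [pv_pyGetD_zero]
  | cons x t ih =>
    by_cases h : p x = true
    · simp [List.filter_cons, h, List.find?, pv_pyGetD_zero]
    · rw [List.filter_cons_of_neg (by simp [h]), ih]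
      simp [List.find?, h]

theorem pv_set_add_append {α : Type} [BEq α] [LawfulBEq α] (s : PySem.Set α) (x : α)
    (h : x ∉ s) : PySem.Set.add s x = s ++ [x] := by
  simp [PySem.Set.add, PySem.Set.contains, h]

theorem pv_update_eq_append {α : Type} [BEq α] [LawfulBEq α] (xs : List α) :
    ∀ (s : PySem.Set α), (s ++ xs).Nodup → PySem.Set.update s xs = s ++ xs := by
  induction xs with
  | nil => intro s _; simp [PySem.Set.update_eq_foldl]
  | cons x t ih =>
    intro s h
    have hx : x ∉ s := by
      intro hmem
      exact ((List.nodup_append.mp h).2.2 x hmem x (by simp)) rfl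
    rw [PySem.Set.update_eq_foldl, List.foldl_cons, pv_set_add_append s x hx,
      ← PySem.Set.update_eq_foldl, ih (s ++ [x]) (by simpa using h)]
    simp

theorem pv_ofList_eq_self {α : Type} [BEq α] [LawfulBEq α] (xs : List α) (h : xs.Nodup) :
    PySem.Set.ofList xs = xs := by
  have := pv_update_eq_append xs ([] : PySem.Set α) (by simpa using h)
  simpa [PySem.Set.update_eq_foldl, PySem.Set.ofList_eq_foldl] using this

-- running max / argmax machinery (A's gap fold vs B's max over adjacent pairs)

theorem pv_max?_cons {α : Type} (key : α → Int) (x : α) (t : List α) :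
    PySem.List.max? (x :: t) key
      = some (t.foldl (fun b i => if key b < key i then i else b) x) := by
  show List.foldl _ (some x) t = _
  induction t generalizing x with
  | nil => simp
  | cons y t ih =>
    simp only [List.foldl_cons]
    by_cases h : key x < key y <;> simp [h, ih]

theorem pv_argmax_foldl (key : Int → Int) (t : List Int) :
    ∀ (x : Int), t.foldl (fun ms i => if key i > ms.1 then (key i, i) else ms) (key x, x)
      = (fun j => (key j, j)) (t.foldl (fun b i => if key b < key i then i else b) x) := by
  induction t with
  | nil => intro x; rfl
  | cons y t ih =>
    intro x
    simp only [List.foldl_cons, gt_iff_lt]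
    by_cases h : key x < key y <;> simp [h, ih]

theorem pv_max?_map {α β : Type} (f : α → β) (key : β → Int) (l : List α) :
    PySem.List.max? (l.map f) key = (PySem.List.max? l (fun x => key (f x))).map f := by
  cases l with
  | nil => rfl
  | cons x t =>
    rw [List.map_cons, pv_max?_cons, pv_max?_cons, Option.map_some]
    congr 1
    induction t generalizing x with
    | nil => rfl
    | cons y t ih =>
      simp only [List.map_cons, List.foldl_cons]
      by_cases h : key (f x) < key (f y) <;> simp [h, ih]

theorem pv_foldl_min_eq_self (x : Int) (t : List Int) (h : ∀ y ∈ t, x ≤ y) :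
    t.foldl min x = x := by
  induction t with
  | nil => rfl
  | cons y t ih =>
    simp only [List.foldl_cons]
    rw [min_eq_left (h y (by simp))]
    exact ih (fun z hz => h z (by simp [hz]))

-- A's nested Counter loop equals Counter(flat)

theorem pv_counts_eq (g : List (List Int))
    (hrect : ∀ row ∈ g, row.length = (g.headD []).length) :
    (PySem.List.pyRange 0 (g.length : Int)).foldl (fun d r =>
      (PySem.List.pyRange 0 ((PySem.List.pyGetD g 0 []).length : Int)).foldl (fun d c =>
        d.modify (PySem.List.pyGetD (PySem.List.pyGetD g r []) c 0) 0 (· + 1)) d)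
      PySem.Dict.empty = PySem.Dict.counter g.flatten := by
  have h0 : PySem.List.pyGetD g 0 [] = g.headD [] := pv_pyGetD_zero g []
  rw [h0]
  have h1 : List.foldl (fun d r =>
      (PySem.List.pyRange 0 ((g.headD []).length : Int)).foldl (fun d c =>
        d.modify (PySem.List.pyGetD (PySem.List.pyGetD g r []) c 0) 0 (· + 1)) d)
      (PySem.Dict.empty : PySem.Dict Int Int) (PySem.List.pyRange 0 (g.length : Int))
      = List.foldl (fun d row =>
          (PySem.List.pyRange 0 ((g.headD []).length : Int)).foldl (fun d c =>
            d.modify (PySem.List.pyGetD row c 0) 0 (· + 1)) d) PySem.Dict.empty g :=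
    PySem.List.foldl_pyRange_zero_pyGetD' g []
      (fun (d : PySem.Dict Int Int) row => (PySem.List.pyRange 0 ((g.headD []).length : Int)).foldl (fun d c =>
        d.modify (PySem.List.pyGetD row c 0) 0 (· + 1)) d) PySem.Dict.empty
  rw [h1]
  rw [PySem.List.foldl_congr_mem g _ (fun d row => row.foldl (fun d v => d.modify v 0 (· + 1)) d) _
    (by
      intro d row hrow
      rw [← hrect row hrow]
      exact PySem.List.foldl_pyRange_zero_pyGetD' row 0 (fun d v => d.modify v 0 (· + 1)) d)]
  rw [← List.foldl_flatten, PySem.Dict.counter_eq_foldl]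

-- A's nested foreground-cell Set loop equals the flat comprehension pvCells

theorem pv_nodup_flatMap (l : List (Int × List Int)) (f : (Int × List Int) → List (Int × Int))
    (h1 : (l.map (·.1)).Nodup) (h2 : ∀ rr ∈ l, (f rr).Nodup)
    (h3 : ∀ rr ∈ l, ∀ p ∈ f rr, p.1 = rr.1) : (l.flatMap f).Nodup := by
  induction l with
  | nil => simp
  | cons x t ih =>
    rw [List.flatMap_cons, List.nodup_append]
    refine ⟨h2 x (by simp), ih (by simpa using h1.of_cons)
      (fun rr hrr => h2 rr (by simp [hrr])) (fun rr hrr => h3 rr (by simp [hrr])), ?_⟩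
    intro p hp q hq
    have hpx : p.1 = x.1 := h3 x (by simp) p hp
    rcases List.mem_flatMap.mp hq with ⟨rr, hrr, hqrr⟩
    have hqr : q.1 = rr.1 := h3 rr (by simp [hrr]) q hqrr
    intro hpq
    have : x.1 ∈ t.map (·.1) := by
      refine List.mem_map.mpr ⟨rr, hrr, ?_⟩
      rw [← hqr, ← hpq, hpx]
    simp only [List.map_cons, List.nodup_cons] at h1
    exact h1.1 this

theorem pv_mem_enumerate {α : Type} {xs : List α} {rr : Int × α} (d : α)
    (h : rr ∈ PySem.List.enumerate xs) : 0 ≤ rr.1 ∧ rr.1 < (xs.length : Int) ∧ rr.2 = PySem.List.pyGetD xs rr.1 d := by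
  rw [PySem.List.enumerate_eq_map_pyRange xs d] at h
  rcases List.mem_map.mp h with ⟨j, hj, hrr⟩
  have hj' := PySem.List.mem_pyRange_one.mp hj
  simp only [PySem.List.len] at hj'
  constructor
  · rw [← hrr]; exact hj'.1
  constructor
  · rw [← hrr]; exact hj'.2
  · rw [← hrr]

theorem pv_enumerate_mem {α : Type} (xs : List α) (d : α) (i : Int)
    (h0 : 0 ≤ i) (h1 : i < (xs.length : Int)) :
    ((i, PySem.List.pyGetD xs i d) : Int × α) ∈ PySem.List.enumerate xs := by
  rw [PySem.List.enumerate_eq_map_pyRange xs d]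
  exact List.mem_map.mpr ⟨i, PySem.List.mem_pyRange_one.mpr ⟨h0, by simpa [PySem.List.len] using h1⟩, rfl⟩

theorem pv_nodup_pvCells (g : List (List Int)) : (pvCells g).Nodup := by
  unfold pvCells
  apply pv_nodup_flatMap
  · rw [PySem.List.map_fst_enumerate]
    exact PySem.List.nodup_pyRange_one 0 _
  · intro rr _
    have : ((PySem.List.enumerate rr.2).filter (fun cv => cv.2 == pvFg g)).map (fun cv => (rr.1, cv.1))
        = (((PySem.List.enumerate rr.2).filter (fun cv => cv.2 == pvFg g)).map (·.1)).map (fun c => (rr.1, c)) := by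
      rw [List.map_map]; rfl
    rw [this]
    apply List.Nodup.map
    · intro a b hab
      simpa using hab
    · apply List.Nodup.sublist (List.Sublist.map _ (List.filter_sublist (l := PySem.List.enumerate rr.2)))
      rw [PySem.List.map_fst_enumerate]
      exact PySem.List.nodup_pyRange_one 0 _
  · intro rr _ p hp
    rcases List.mem_map.mp hp with ⟨cv, _, hcv⟩
    rw [← hcv]

theorem pv_foldl_update {α : Type} [BEq (Int × Int)] (l : List α) (f : α → List (Int × Int)) :
    ∀ s : PySem.Set (Int × Int), l.foldl (fun s x => PySem.Set.update s (f x)) s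
      = PySem.Set.update s (l.flatMap f) := by
  induction l with
  | nil => intro s; simp [PySem.Set.update_eq_foldl]
  | cons x t ih =>
    intro s
    rw [List.foldl_cons, ih, List.flatMap_cons]
    simp [PySem.Set.update_eq_foldl, List.foldl_append]

theorem pv_fgcells_eq (g : List (List Int))
    (hrect : ∀ row ∈ g, row.length = (g.headD []).length) (fg : Int) :
    (PySem.List.pyRange 0 (g.length : Int)).foldl (fun s r =>
      (PySem.List.pyRange 0 ((PySem.List.pyGetD g 0 []).length : Int)).foldl (fun s c =>
        if PySem.List.pyGetD (PySem.List.pyGetD g r []) c 0 = fg then s.add (r, c) else s) s)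
      PySem.Set.empty
    = PySem.Set.ofList ((PySem.List.enumerate g).flatMap (fun rr =>
        ((PySem.List.enumerate rr.2).filter (fun cv => cv.2 == fg)).map (fun cv => (rr.1, cv.1)))) := by
  have h0 : PySem.List.pyGetD g 0 [] = g.headD [] := pv_pyGetD_zero g []
  rw [h0]
  have h1 : ∀ (init : PySem.Set (Int × Int)),
      (PySem.List.pyRange 0 (g.length : Int)).foldl (fun s r =>
        (PySem.List.pyRange 0 ((g.headD []).length : Int)).foldl (fun s c =>
          if PySem.List.pyGetD (PySem.List.pyGetD g r []) c 0 = fg then s.add (r, c) else s) s) init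
      = (PySem.List.enumerate g).foldl (fun s rr =>
        (PySem.List.pyRange 0 ((g.headD []).length : Int)).foldl (fun s c =>
          if PySem.List.pyGetD rr.2 c 0 = fg then s.add (rr.1, c) else s) s) init := by
    intro init
    rw [PySem.List.enumerate_eq_map_pyRange g [], List.foldl_map]
    simp [PySem.List.len]
  rw [h1]
  rw [PySem.List.foldl_congr_mem (PySem.List.enumerate g) _
    (fun s rr => PySem.Set.update s
      (((PySem.List.enumerate rr.2).filter (fun cv => cv.2 == fg)).map (fun cv => (rr.1, cv.1)))) _
    (by
      intro s rr hrr
      have hrow : rr.2 ∈ g := by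
        rcases pv_mem_enumerate ([] : List Int) hrr with ⟨ha, hb, hc⟩
        rw [hc, PySem.List.pyGetD_eq_getElem g [] ha hb]
        exact List.getElem_mem _
      rw [← hrect rr.2 hrow]
      have h2 : (PySem.List.pyRange 0 (rr.2.length : Int)).foldl (fun s c =>
          if PySem.List.pyGetD rr.2 c 0 = fg then s.add (rr.1, c) else s) s
          = (PySem.List.enumerate rr.2).foldl (fun s cv =>
            if cv.2 = fg then s.add (rr.1, cv.1) else s) s := by
        rw [PySem.List.enumerate_eq_map_pyRange rr.2 0, List.foldl_map]
        simp [PySem.List.len]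
      rw [h2]
      have h4 : (PySem.List.enumerate rr.2).foldl (fun s cv =>
            if cv.2 = fg then s.add (rr.1, cv.1) else s) s
          = ((PySem.List.enumerate rr.2).filter (fun cv => decide (cv.2 = fg))).foldl
              (fun s cv => s.add (rr.1, cv.1)) s :=
        PySem.List.foldl_ite_eq_foldl_filter (fun cv : Int × Int => cv.2 = fg) (fun (s : PySem.Set (Int × Int)) cv => s.add (rr.1, cv.1)) _ s
      rw [h4]
      have h3 : (PySem.List.enumerate rr.2).filter (fun cv => decide (cv.2 = fg))
          = (PySem.List.enumerate rr.2).filter (fun cv => cv.2 == fg) := by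
        apply List.filter_congr
        intro cv _
        by_cases h : cv.2 = fg <;> simp [h]
      rw [h3]
      simp only [PySem.Set.update_eq_foldl, List.foldl_map])]
  rw [pv_foldl_update]
  rw [PySem.Set.ofList_eq_foldl, PySem.Set.update_eq_foldl]
  rfl

-- the fg cells characterised by bounds and a grid lookup

theorem pv_mem_cells (g : List (List Int))
    (hrect : ∀ row ∈ g, row.length = (g.headD []).length) (p : Int × Int) :
    p ∈ pvCells g ↔ (0 ≤ p.1 ∧ p.1 < (g.length : Int) ∧ 0 ≤ p.2 ∧ p.2 < ((g.headD []).length : Int) ∧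
      PySem.List.pyGetD (PySem.List.pyGetD g p.1 []) p.2 0 = pvFg g) := by
  constructor
  · intro hp
    rcases List.mem_flatMap.mp hp with ⟨rr, hrr, hprr⟩
    rcases List.mem_map.mp hprr with ⟨cv, hcv, hpcv⟩
    rcases List.mem_filter.mp hcv with ⟨hcvE, hcvfg⟩
    rcases pv_mem_enumerate ([] : List Int) hrr with ⟨hr0, hr1, hr2⟩
    rcases pv_mem_enumerate (0 : Int) hcvE with ⟨hc0, hc1, hc2⟩
    have hrow : rr.2 ∈ g := by
      rw [hr2, PySem.List.pyGetD_eq_getElem g [] hr0 hr1]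
      exact List.getElem_mem _
    have hlen : rr.2.length = (g.headD []).length := hrect rr.2 hrow
    refine ⟨by rw [← hpcv]; exact hr0, by rw [← hpcv]; exact hr1, by rw [← hpcv]; exact hc0, ?_, ?_⟩
    · rw [← hpcv]; show cv.1 < _; rw [← hlen]; exact_mod_cast hc1
    · rw [← hpcv]
      show PySem.List.pyGetD (PySem.List.pyGetD g rr.1 []) cv.1 0 = pvFg g
      rw [← hr2, ← hc2]
      simpa using hcvfg
  · rintro ⟨h0, h1, h2, h3, h4⟩
    apply List.mem_flatMap.mpr
    refine ⟨(p.1, PySem.List.pyGetD g p.1 []), pv_enumerate_mem g [] p.1 h0 h1, ?_⟩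
    apply List.mem_map.mpr
    have hrow : PySem.List.pyGetD g p.1 [] ∈ g := by
      rw [PySem.List.pyGetD_eq_getElem g [] h0 h1]
      exact List.getElem_mem _
    have hlen : (PySem.List.pyGetD g p.1 []).length = (g.headD []).length := hrect _ hrow
    refine ⟨(p.2, PySem.List.pyGetD (PySem.List.pyGetD g p.1 []) p.2 0), ?_, by simp⟩
    apply List.mem_filter.mpr
    refine ⟨pv_enumerate_mem _ 0 p.2 h2 (by rw [hlen]; exact_mod_cast h3), by simpa using h4⟩

-- A's row->offsets dict characterised (build_row_offsets)

theorem pv_group_getD (anchor : Int) (l : List (Int × Int)) :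
    ∀ (d : PySem.Dict Int (List Int)) (r : Int),
      (l.foldl (fun m p => m.modify p.1 [] (fun s => s ++ [p.2 - anchor])) d).getD r []
      = d.getD r [] ++ (l.filter (fun p => p.1 == r)).map (fun p => p.2 - anchor) := by
  induction l with
  | nil => intro d r; simp
  | cons p t ih =>
    intro d r
    rw [List.foldl_cons, ih]
    show (d.insert p.1 _).getD r [] ++ _ = _
    rw [PySem.Dict.getD_insert]
    by_cases h : r = p.1
    · rw [if_pos h, List.filter_cons_of_pos (by simp [h]), List.map_cons, h]
      simp
    · rw [if_neg h, List.filter_cons_of_neg (by simpa using fun hh => absurd hh.symm h)]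

theorem pv_group_contains (anchor : Int) (l : List (Int × Int)) :
    ∀ (d : PySem.Dict Int (List Int)) (r : Int),
      (l.foldl (fun m p => m.modify p.1 [] (fun s => s ++ [p.2 - anchor])) d).contains r
      = (d.contains r || (l.map (·.1)).contains r) := by
  induction l with
  | nil => intro d r; simp
  | cons p t ih =>
    intro d r
    rw [List.foldl_cons, ih]
    show ((d.insert p.1 _).contains r || _) = _
    rw [PySem.Dict.contains_insert]
    cases d.contains r <;> simp [Bool.or_comm]

-- a fold of in-bounds writes equals the pointwise rebuild

theorem pv_writes (cols : Int) (W : List (Int × Int)) :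
    ∀ (g : List (List Int)),
    (∀ row ∈ g, (row.length : Int) = cols) →
    (∀ p ∈ W, 0 ≤ p.1 ∧ p.1 < (g.length : Int) ∧ 0 ≤ p.2 ∧ p.2 < cols) →
    W.foldl (fun g p => pySetCell g p.1 p.2 9) g
    = (PySem.List.enumerate g).map (fun rr => (PySem.List.enumerate rr.2).map (fun cv =>
        if (rr.1, cv.1) ∈ W then 9 else cv.2)) := by
  induction W with
  | nil =>
    intro g _ _
    simp only [List.foldl_nil]
    have hinner : ∀ rr : Int × List Int,
        ((PySem.List.enumerate rr.2).map (fun cv =>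
          if ((rr.1, cv.1) : Int × Int) ∈ ([] : List (Int × Int)) then (9 : Int) else cv.2)) = rr.2 := by
      intro rr
      rw [List.map_congr_left (fun cv _ => by simp : ∀ cv ∈ PySem.List.enumerate rr.2,
        (if ((rr.1, cv.1) : Int × Int) ∈ ([] : List (Int × Int)) then (9 : Int) else cv.2) = cv.2)]
      exact PySem.List.map_snd_enumerate rr.2 0
    rw [List.map_congr_left (fun rr _ => hinner rr)]
    simpa using PySem.List.map_snd_enumerate g 0
  | cons p W ih =>
    intro g hrect hb
    rw [List.foldl_cons]
    have hp := hb p (by simp)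
    set g' := pySetCell g p.1 p.2 9 with hg'
    have hlen' : g'.length = g.length := by simp [hg', pySetCell]
    have hrow' : ∀ i (h : i < g'.length), g'[i].length = (g[i]'(by omega)).length := by
      intro i h
      by_cases hi : i = p.1.toNat
      · subst hi
        simp [hg', pySetCell, List.getElem_set_self, List.getD_eq_getElem?_getD,
          List.getElem?_eq_getElem (by omega : p.1.toNat < g.length)]
      · simp [hg', pySetCell, List.getElem_set_ne (Ne.symm (by omega))]
    have hrect' : ∀ row ∈ g', (row.length : Int) = cols := by
      intro row hrow
      rcases List.getElem_of_mem hrow with ⟨i, hi, hrr⟩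
      rw [← hrr, hrow' i hi]
      exact hrect _ (List.getElem_mem _)
    have hb' : ∀ q ∈ W, 0 ≤ q.1 ∧ q.1 < (g'.length : Int) ∧ 0 ≤ q.2 ∧ q.2 < cols := by
      intro q hq; have := hb q (by simp [hq]); omega
    rw [ih g' hrect' hb']
    apply List.ext_getElem
    · simp [hlen']
    intro i hi1 hi2
    have hig : i < g.length := by simpa using hi2
    have hig' : i < g'.length := by simpa using hi1
    simp only [List.getElem_map, PySem.List.getElem_enumerate, zero_add]
    apply List.ext_getElem
    · simpa using hrow' i hig'
    intro j hj1 hj2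
    have hjg : j < g[i].length := by simpa using hj2
    simp only [List.getElem_map, PySem.List.getElem_enumerate, zero_add]
    have hrowi : g'[i] = if i = p.1.toNat then g[i].set p.2.toNat 9 else g[i] := by
      by_cases hip : i = p.1.toNat
      · subst hip
        simp [hg', pySetCell, List.getElem_set_self, List.getD_eq_getElem?_getD,
          List.getElem?_eq_getElem (by omega : p.1.toNat < g.length)]
      · simp [hg', pySetCell, List.getElem_set_ne (Ne.symm hip), hip]
    by_cases hW : ((i : Int), (j : Int)) ∈ W
    · rw [if_pos hW, if_pos (by simp [hW])]
    · rw [if_neg hW]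
      by_cases hpp : ((i : Int), (j : Int)) = p
      · rw [if_pos (by simp [hpp])]
        have hi' : i = p.1.toNat := by
          have := congrArg Prod.fst hpp; simp at this; omega
        have hj' : j = p.2.toNat := by
          have := congrArg Prod.snd hpp; simp at this; omega
        subst hi' hj'
        simp only [hrowi, if_true, eq_self_iff_true]
        rw [List.getElem_set_self (by simpa using hj2)]
      · rw [if_neg (by
          simp only [List.mem_cons]
          rintro (h | h)
          · exact hpp h
          · exact hW h)]
        simp only [hrowi]
        by_cases hip : i = p.1.toNat
        · simp only [if_pos hip]
          subst hip
          have hjp : j ≠ p.2.toNat := by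
            intro hj'
            apply hpp
            have := hp
            ext <;> simp <;> omega
          rw [List.getElem_set_ne (Ne.symm hjp)]
        · simp only [if_neg hip]

-- membership in the split prefix/suffix of the strictly increasing column list

theorem pv_mem_take_iff (cs : List Int) (h : cs.Pairwise (· < ·)) (S : Nat)
    (hS : S < cs.length) (c : Int) (hc : c ∈ cs) :
    c ∈ cs.take (S + 1) ↔ c ≤ cs[S] := by
  have hmono : ∀ (i j : Nat) (hi : i < cs.length) (hj : j < cs.length), i < j → cs[i] < cs[j] :=
    fun i j hi hj hij => List.pairwise_iff_getElem.mp h i j hi hj hij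
  constructor
  · intro hmem
    rcases List.mem_iff_getElem.mp hmem with ⟨k, hk, hck⟩
    have hk1 : k < S + 1 := lt_of_lt_of_le hk (by simp)
    rw [List.getElem_take] at hck
    rcases Nat.lt_or_ge k S with hkS | hkS
    · exact le_of_lt (hck ▸ hmono k S (by omega) hS hkS)
    · have : k = S := by omega
      subst this; rw [← hck]
  · intro hle
    rcases List.getElem_of_mem hc with ⟨j, hj, hcj⟩
    have hjS : j ≤ S := by
      by_contra hgt
      exact absurd (hcj ▸ hle) (not_le.mpr (hmono S j hS hj (by omega)))
    refine List.mem_iff_getElem.mpr ⟨j, by simp; omega, ?_⟩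
    rw [List.getElem_take]; exact hcj

theorem pv_mem_drop_iff (cs : List Int) (h : cs.Pairwise (· < ·)) (S : Nat)
    (hS : S < cs.length) (c : Int) (hc : c ∈ cs) :
    c ∈ cs.drop (S + 1) ↔ cs[S] < c := by
  have hmono : ∀ (i j : Nat) (hi : i < cs.length) (hj : j < cs.length), i < j → cs[i] < cs[j] :=
    fun i j hi hj hij => List.pairwise_iff_getElem.mp h i j hi hj hij
  constructor
  · intro hmem
    rcases List.mem_iff_getElem.mp hmem with ⟨k, hk, hck⟩
    rw [List.getElem_drop] at hck
    exact hck ▸ hmono S (S + 1 + k) hS (by simp at hk; omega) (by omega)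
  · intro hlt
    rcases List.getElem_of_mem hc with ⟨j, hj, hcj⟩
    have hjS : S + 1 ≤ j := by
      by_contra hgt
      have hle : c ≤ cs[S] := by
        rcases Nat.lt_or_ge j S with hjS' | hjS'
        · exact le_of_lt (hcj ▸ hmono j S (by omega) hS hjS')
        · have : j = S := by omega
          subst this; rw [hcj]
      exact absurd hlt (not_lt.mpr hle)
    refine List.mem_iff_getElem.mpr ⟨j - (S + 1), by simp; omega, ?_⟩
    rw [List.getElem_drop]
    simp only [show S + 1 + (j - (S + 1)) = j from by omega]
    exact hcj

theorem pv_min_take (cs : List Int) (h : cs.Pairwise (· < ·)) (S : Nat) (hne : cs ≠ []) :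
    ((PySem.List.min? (cs.take (S + 1)) (fun x => x)).getD 0) = cs.headD 0 := by
  rcases List.exists_cons_of_ne_nil hne with ⟨c0, t, hcs⟩
  subst hcs
  rw [List.take_succ_cons, PySem.List.min?_id_cons]
  simp only [Option.getD_some, List.headD_cons]
  apply pv_foldl_min_eq_self
  intro y hy
  have hyt : y ∈ t := List.mem_of_mem_take hy
  exact le_of_lt ((List.pairwise_cons.mp h).1 y hyt)

theorem pv_min_drop (cs : List Int) (h : cs.Pairwise (· < ·)) (S : Nat) (hS : S + 1 < cs.length) :
    ((PySem.List.min? (cs.drop (S + 1)) (fun x => x)).getD 0) = cs[S + 1] := by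
  rw [List.drop_eq_getElem_cons hS, PySem.List.min?_id_cons]
  simp only [Option.getD_some]
  apply pv_foldl_min_eq_self
  intro y hy
  rcases List.mem_iff_getElem.mp hy with ⟨k, hk, hyk⟩
  rw [List.getElem_drop] at hyk
  exact le_of_lt (hyk ▸ List.pairwise_iff_getElem.mp h (S + 1) (S + 1 + 1 + k) hS
    (by simp at hk; omega) (by omega))

-- A's dict-driven extension loop equals a pointwise rebuild against a pushed target set

theorem pv_extend (g : List (List Int)) (cols : Int)
    (hrect : ∀ row ∈ g, (row.length : Int) = cols)
    (pb : Int → Bool) (cells : List (Int × Int)) (a ra d lo hi : Int)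
    (hd : d = a - ra) (h0lo : 0 ≤ lo) (hhi : hi < (g.length : Int)) :
    extendLoop g cols ((cells.filter (fun p => pb p.2)).foldl
        (fun m p => m.modify p.1 [] (fun l => l ++ [p.2 - ra])) PySem.Dict.empty) a (lo + 1) hi
    = (PySem.List.enumerate g).map (fun rr => (PySem.List.enumerate rr.2).map (fun cv =>
        if (PySem.Set.ofList ((cells.filter (fun p =>
            pb p.2 && decide (lo < p.1) && decide (p.1 ≤ hi) &&
            decide (0 ≤ p.2 + d) && decide (p.2 + d < cols))).map
              (fun p => (p.1, p.2 + d)))).contains (rr.1, cv.1) = true then 9 else cv.2)) := by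
  subst hd
  set CR := cells.filter (fun p => pb p.2) with hCR
  set offs := CR.foldl (fun m p => m.modify p.1 [] (fun l => l ++ [p.2 - ra])) PySem.Dict.empty with hoffs
  have hcontains : ∀ r, offs.contains r = (CR.map (·.1)).contains r := by
    intro r
    rw [hoffs, pv_group_contains]
    rfl
  have hgetD : ∀ r, offs.getD r [] = (CR.filter (fun p => p.1 == r)).map (fun p => p.2 - ra) := by
    intro r
    rw [hoffs, pv_group_getD]
    rfl
  have hbody : extendLoop g cols offs a (lo + 1) hi
      = (PySem.List.pyRange (lo + 1) (hi + 1)).foldl (fun G r =>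
          (CR.filter (fun p => p.1 == r)).foldl (fun G p =>
            if 0 ≤ a + (p.2 - ra) ∧ a + (p.2 - ra) < cols then pySetCell G r (a + (p.2 - ra)) 9 else G) G) g := by
    unfold extendLoop
    apply PySem.List.foldl_congr_mem
    intro G r _
    by_cases hc : offs.contains r
    · rw [if_pos hc, hgetD r, List.foldl_map]
    · rw [if_neg hc]
      have hnil : CR.filter (fun p => p.1 == r) = [] := by
        rw [List.filter_eq_nil_iff]
        intro p hp hbe
        apply hc
        rw [hcontains r]
        exact List.contains_iff_mem.mpr (List.mem_map.mpr ⟨p, hp, by simpa using hbe⟩)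
      rw [hnil]
      rfl
  rw [hbody]
  set Wall := (PySem.List.pyRange (lo + 1) (hi + 1)).flatMap (fun r =>
    (CR.filter (fun p => p.1 == r)).map (fun p => (r, a + (p.2 - ra)))) with hWall
  have hflat : (PySem.List.pyRange (lo + 1) (hi + 1)).foldl (fun G r =>
          (CR.filter (fun p => p.1 == r)).foldl (fun G p =>
            if 0 ≤ a + (p.2 - ra) ∧ a + (p.2 - ra) < cols then pySetCell G r (a + (p.2 - ra)) 9 else G) G) g
      = Wall.foldl (fun G q =>
          if 0 ≤ q.2 ∧ q.2 < cols then pySetCell G q.1 q.2 9 else G) g := by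
    rw [hWall, List.flatMap_def, List.foldl_flatten, List.foldl_map]
    apply PySem.List.foldl_congr_mem
    intro G r _
    rw [List.foldl_map]
  rw [hflat]
  have hite : Wall.foldl (fun G q =>
          if 0 ≤ q.2 ∧ q.2 < cols then pySetCell G q.1 q.2 9 else G) g
      = (Wall.filter (fun q => decide (0 ≤ q.2 ∧ q.2 < cols))).foldl
          (fun G q => pySetCell G q.1 q.2 9) g :=
    PySem.List.foldl_ite_eq_foldl_filter (fun q : Int × Int => 0 ≤ q.2 ∧ q.2 < cols)
      (fun G q => pySetCell G q.1 q.2 9) Wall g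
  rw [hite]
  set W := Wall.filter (fun q => decide (0 ≤ q.2 ∧ q.2 < cols)) with hW
  have hmemWall : ∀ q : Int × Int, q ∈ Wall ↔
      ∃ p ∈ cells, pb p.2 ∧ lo < p.1 ∧ p.1 ≤ hi ∧ q = (p.1, a + (p.2 - ra)) := by
    intro q
    rw [hWall, List.mem_flatMap]
    constructor
    · rintro ⟨r, hr, hq⟩
      rcases List.mem_map.mp hq with ⟨p, hp, hqp⟩
      rcases List.mem_filter.mp hp with ⟨hpCR, hpr⟩
      rcases List.mem_filter.mp (hCR ▸ hpCR) with ⟨hpc, hpb⟩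
      have hr' := PySem.List.mem_pyRange_one.mp hr
      have hpr' : p.1 = r := by simpa using hpr
      exact ⟨p, hpc, hpb, by omega, by omega, by rw [← hqp, hpr']⟩
    · rintro ⟨p, hpc, hpb, hlo, hhi', hq⟩
      refine ⟨p.1, PySem.List.mem_pyRange_one.mpr ⟨by omega, by omega⟩, ?_⟩
      refine List.mem_map.mpr ⟨p, List.mem_filter.mpr ⟨hCR ▸ List.mem_filter.mpr ⟨hpc, hpb⟩, by simp⟩, hq.symm⟩
  have hmem : ∀ q : Int × Int, q ∈ W ↔
      q ∈ (cells.filter (fun p =>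
            pb p.2 && decide (lo < p.1) && decide (p.1 ≤ hi) &&
            decide (0 ≤ p.2 + (a - ra)) && decide (p.2 + (a - ra) < cols))).map
              (fun p => (p.1, p.2 + (a - ra))) := by
    intro q
    rw [hW, List.mem_filter, hmemWall q, List.mem_map]
    constructor
    · rintro ⟨⟨p, hpc, hpb, hlo, hhi', hq⟩, hbnd⟩
      have hb' := of_decide_eq_true hbnd
      have hq2 : q.2 = a + (p.2 - ra) := by rw [hq]
      refine ⟨p, List.mem_filter.mpr ⟨hpc, ?_⟩, ?_⟩
      · simp only [Bool.and_eq_true, decide_eq_true_eq]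
        refine ⟨⟨⟨⟨hpb, hlo⟩, hhi'⟩, by omega⟩, by omega⟩
      · rw [hq]
        have : a + (p.2 - ra) = p.2 + (a - ra) := by ring
        rw [this]
    · rintro ⟨p, hp, hq⟩
      rcases List.mem_filter.mp hp with ⟨hpc, hcond⟩
      simp only [Bool.and_eq_true, decide_eq_true_eq] at hcond
      obtain ⟨⟨⟨⟨hpb, hlo⟩, hhi'⟩, hb1⟩, hb2⟩ := hcond
      constructor
      · exact ⟨p, hpc, hpb, hlo, hhi', by rw [← hq]; ext <;> simp <;> ring⟩
      · rw [← hq]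
        simp only [decide_eq_true_eq]
        constructor <;> omega
  have hWb : ∀ q ∈ W, 0 ≤ q.1 ∧ q.1 < (g.length : Int) ∧ 0 ≤ q.2 ∧ q.2 < cols := by
    intro q hq
    rcases List.mem_filter.mp hq with ⟨hqWall, hbnd⟩
    have hb' := of_decide_eq_true hbnd
    rcases (hmemWall q).mp hqWall with ⟨p, _, _, hlo, hhi', hq'⟩
    have : q.1 = p.1 := by rw [hq']
    refine ⟨by omega, by omega, hb'.1, hb'.2⟩
  rw [pv_writes cols W g hrect hWb]
  apply List.map_congr_left
  intro rr _
  apply List.map_congr_left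
  intro cv _
  by_cases hq : ((rr.1, cv.1) : Int × Int) ∈ W
  · rw [if_pos hq]
    have hcont : (PySem.Set.ofList ((cells.filter (fun p =>
            pb p.2 && decide (lo < p.1) && decide (p.1 ≤ hi) &&
            decide (0 ≤ p.2 + (a - ra)) && decide (p.2 + (a - ra) < cols))).map
              (fun p => (p.1, p.2 + (a - ra))))).contains (rr.1, cv.1) = true :=
      List.contains_iff_mem.mpr ((PySem.Set.mem_ofList _ _).mpr ((hmem _).mp hq))
    rw [if_pos hcont]
  · rw [if_neg hq, if_neg ?hn]
    case hn =>
      intro hcont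
      exact hq ((hmem _).mpr ((PySem.Set.mem_ofList _ _).mp (List.contains_iff_mem.mp hcont)))

-- specialisation: A's foreground-cell loop gives exactly pvCells

theorem pv_fgcells_eq' (g : List (List Int))
    (hrect : ∀ row ∈ g, row.length = (g.headD []).length) :
    (PySem.List.pyRange 0 (g.length : Int)).foldl (fun s r =>
      (PySem.List.pyRange 0 ((PySem.List.pyGetD g 0 []).length : Int)).foldl (fun s c =>
        if PySem.List.pyGetD (PySem.List.pyGetD g r []) c 0 = pvFg g then s.add (r, c) else s) s)
      PySem.Set.empty = pvCells g := by
  rw [pv_fgcells_eq g hrect (pvFg g)]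
  exact pv_ofList_eq_self _ (pv_nodup_pvCells g)

-- B's deepest-row entry is some iff the column holds a fg cell; its value is that column's max row

theorem pv_deepest_isSome (g : List (List Int)) (fg rows c : Int) :
    (pvDeepest g fg rows c).isSome = true ↔
      ∃ r, r ∈ PySem.List.pyRange 0 rows ∧ PySem.List.pyGetD (PySem.List.pyGetD g r []) c 0 = fg := by
  unfold pvDeepest
  rw [Option.isSome_iff_ne_none, ne_eq, PySem.List.max?_eq_none_iff, List.filter_eq_nil_iff]
  push_neg
  constructor
  · rintro ⟨r, hr, h⟩
    exact ⟨r, hr, by simpa using h⟩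
  · rintro ⟨r, hr, h⟩
    exact ⟨r, hr, by simpa using h⟩

theorem pv_deepest_some (g : List (List Int)) (fg rows c d : Int)
    (h : pvDeepest g fg rows c = some d) :
    (0 ≤ d ∧ d < rows ∧ PySem.List.pyGetD (PySem.List.pyGetD g d []) c 0 = fg) ∧
    (∀ r, 0 ≤ r → r < rows → PySem.List.pyGetD (PySem.List.pyGetD g r []) c 0 = fg → r ≤ d) := by
  have hmem := PySem.List.max?_mem h
  rcases List.mem_filter.mp hmem with ⟨h1, h2⟩
  have hb := PySem.List.mem_pyRange_one.mp h1
  refine ⟨⟨hb.1, hb.2, by simpa using h2⟩, ?_⟩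
  intro r hr0 hr1 hrfg
  exact PySem.List.max?_isMax h r (List.mem_filter.mpr
    ⟨PySem.List.mem_pyRange_one.mpr ⟨hr0, hr1⟩, by simpa using hrfg⟩)

-- B's column sweep lists exactly the sorted distinct fg columns

theorem pv_cols_eq (g : List (List Int))
    (hrect : ∀ row ∈ g, row.length = (g.headD []).length) :
    (PySem.List.pyRange 0 ((g.headD []).length : Int)).filter
      (fun c => (pvDeepest g (pvFg g) (g.length : Int) c).isSome) = pvCols g := by
  have hpw : ((PySem.List.pyRange 0 ((g.headD []).length : Int)).filter
      (fun c => (pvDeepest g (pvFg g) (g.length : Int) c).isSome)).Pairwise (· < ·) := by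
    apply List.Pairwise.sublist List.filter_sublist
    rw [PySem.List.pyRange_zero_natCast]
    exact List.Pairwise.map _ (fun a b h => by exact_mod_cast h) List.pairwise_lt_range
  have hmemiff : ∀ c : Int,
      (c ∈ (PySem.List.pyRange 0 ((g.headD []).length : Int)).filter
        (fun x => (pvDeepest g (pvFg g) (g.length : Int) x).isSome)) ↔
      c ∈ PySem.Set.ofList ((pvCells g).map (·.2)) := by
    intro c
    rw [List.mem_filter, PySem.Set.mem_ofList, List.mem_map]
    constructor
    · rintro ⟨hcr, hds⟩
      rcases (pv_deepest_isSome g (pvFg g) (g.length : Int) c).mp hds with ⟨r, hr, hfg⟩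
      have hrb := PySem.List.mem_pyRange_one.mp hr
      have hcb := PySem.List.mem_pyRange_one.mp hcr
      exact ⟨(r, c), (pv_mem_cells g hrect (r, c)).mpr ⟨hrb.1, hrb.2, hcb.1, hcb.2, hfg⟩, rfl⟩
    · rintro ⟨p, hp, hpc⟩
      rcases (pv_mem_cells g hrect p).mp hp with ⟨h0, h1, h2, h3, h4⟩
      subst hpc
      refine ⟨PySem.List.mem_pyRange_one.mpr ⟨h2, h3⟩, ?_⟩
      exact (pv_deepest_isSome g (pvFg g) (g.length : Int) p.2).mpr
        ⟨p.1, PySem.List.mem_pyRange_one.mpr ⟨h0, h1⟩, h4⟩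
  unfold pvCols
  exact (PySem.List.sorted_eq_of_perm_of_pairwise_lt _ _ _
    ((List.perm_ext_iff_of_nodup
      (List.Nodup.filter _ (by
        rw [PySem.List.pyRange_zero_natCast]
        exact List.Nodup.map (fun a b h => by exact_mod_cast h) List.nodup_range))
      (PySem.Set.nodup_ofList _)).mpr hmemiff)
    hpw).symm

-- B's zip of consecutive fg columns as a map over the gap-index range

theorem pv_zip_eq (cs : List Int) (h2 : 2 ≤ cs.length) :
    List.zip cs (cs.drop 1)
      = (PySem.List.pyRange 0 ((cs.length : Int) - 1)).map
          (fun i => (PySem.List.pyGetD cs i 0, PySem.List.pyGetD cs (i + 1) 0)) := by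
  have hn : ((cs.length : Int) - 1) = ((cs.length - 1 : Nat) : Int) := by omega
  rw [hn, PySem.List.pyRange_zero_natCast, List.map_map]
  apply List.ext_getElem
  · simp
  intro i hi1 hi2
  have hil : i < cs.length - 1 := by simpa using hi2
  rw [List.getElem_zip]
  simp only [List.getElem_map, List.getElem_range, Function.comp_apply]
  have e1 : PySem.List.pyGetD cs ((i : Int)) 0 = cs[i]'(by omega) := by
    rw [PySem.List.pyGetD_eq_getElem cs 0 (by omega) (by exact_mod_cast hil.trans (by omega))]
    congr 1 <;> omega
  have e2 : PySem.List.pyGetD cs ((i : Int) + 1) 0 = cs[i + 1]'(by omega) := by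
    rw [PySem.List.pyGetD_eq_getElem cs 0 (by omega) (by push_cast; omega)]
    congr 1 <;> omega
  rw [e1, e2]
  congr 1
  rw [List.getElem_drop]
  congr 1
  omega

-- a max over cell rows equals the max over per-column deepest rows (value equality)

theorem pv_maxmax (g : List (List Int))
    (hrect : ∀ row ∈ g, row.length = (g.headD []).length)
    (pb : Int → Bool) (hne : ∃ p ∈ pvCells g, pb p.2 = true) :
    (PySem.List.max? (((pvCells g).filter (fun p => pb p.2)).map (fun x => x.1)) (fun x => x)).getD 0
    = (PySem.List.max? (((pvCols g).filter pb).map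
        (fun c => (pvDeepest g (pvFg g) (g.length : Int) c).getD 0)) (fun x => x)).getD 0 := by
  have hsnd_cs : ∀ p ∈ pvCells g, p.2 ∈ pvCols g := by
    intro p hp
    unfold pvCols
    rw [PySem.List.mem_sorted, PySem.Set.mem_ofList]
    exact List.mem_map.mpr ⟨p, hp, rfl⟩
  rcases hne with ⟨w, hw, hwpb⟩
  set L1 := ((pvCells g).filter (fun p => pb p.2)).map (fun x => x.1) with hL1
  set L2 := ((pvCols g).filter pb).map
      (fun c => (pvDeepest g (pvFg g) (g.length : Int) c).getD 0) with hL2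
  have hne1 : L1 ≠ [] := by
    intro h
    rw [hL1, List.map_eq_nil_iff, List.filter_eq_nil_iff] at h
    exact h w hw hwpb
  have hne2 : L2 ≠ [] := by
    intro h
    rw [hL2, List.map_eq_nil_iff, List.filter_eq_nil_iff] at h
    exact h w.2 (hsnd_cs w hw) hwpb
  obtain ⟨m1, hm1⟩ : ∃ m1, PySem.List.max? L1 (fun x => x) = some m1 := by
    cases h : PySem.List.max? L1 (fun x => x) with
    | none => exact absurd ((PySem.List.max?_eq_none_iff _ _).mp h) hne1
    | some m => exact ⟨m, rfl⟩
  obtain ⟨m2, hm2⟩ : ∃ m2, PySem.List.max? L2 (fun x => x) = some m2 := by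
    cases h : PySem.List.max? L2 (fun x => x) with
    | none => exact absurd ((PySem.List.max?_eq_none_iff _ _).mp h) hne2
    | some m => exact ⟨m, rfl⟩
  rw [hm1, hm2]
  simp only [Option.getD_some]
  -- m1 ≤ m2
  have h12 : m1 ≤ m2 := by
    rcases List.mem_map.mp (PySem.List.max?_mem hm1) with ⟨p, hpf, hpm⟩
    rcases List.mem_filter.mp hpf with ⟨hpc, hppb⟩
    rcases (pv_mem_cells g hrect p).mp hpc with ⟨hb0, hb1, hb2, hb3, hb4⟩
    obtain ⟨dd, hdd⟩ : ∃ dd, pvDeepest g (pvFg g) (g.length : Int) p.2 = some dd := by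
      cases h : pvDeepest g (pvFg g) (g.length : Int) p.2 with
      | none =>
        have : (pvDeepest g (pvFg g) (g.length : Int) p.2).isSome = true :=
          (pv_deepest_isSome _ _ _ _).mpr ⟨p.1, PySem.List.mem_pyRange_one.mpr ⟨hb0, hb1⟩, hb4⟩
        rw [h] at this; simp at this
      | some d => exact ⟨d, rfl⟩
    have hple : p.1 ≤ dd := (pv_deepest_some g _ _ _ dd hdd).2 p.1 hb0 hb1 hb4
    have hddL2 : dd ∈ L2 := by
      rw [hL2]
      refine List.mem_map.mpr ⟨p.2, List.mem_filter.mpr ⟨hsnd_cs p hpc, hppb⟩, by rw [hdd]; rfl⟩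
    have := PySem.List.max?_isMax hm2 dd hddL2
    omega
  -- m2 ≤ m1
  have h21 : m2 ≤ m1 := by
    rcases List.mem_map.mp (PySem.List.max?_mem hm2) with ⟨c, hcf, hcm⟩
    rcases List.mem_filter.mp hcf with ⟨hcs, hcpb⟩
    have hcmem : c ∈ PySem.Set.ofList ((pvCells g).map (·.2)) := by
      have : c ∈ pvCols g := hcs
      unfold pvCols at this
      rw [PySem.List.mem_sorted] at this
      exact this
    rcases List.mem_map.mp ((PySem.Set.mem_ofList _ _).mp hcmem) with ⟨q, hq, hqc⟩
    rcases (pv_mem_cells g hrect q).mp hq with ⟨hq0, hq1, hq2, hq3, hq4⟩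
    obtain ⟨dd, hdd⟩ : ∃ dd, pvDeepest g (pvFg g) (g.length : Int) c = some dd := by
      cases h : pvDeepest g (pvFg g) (g.length : Int) c with
      | none =>
        have : (pvDeepest g (pvFg g) (g.length : Int) c).isSome = true :=
          (pv_deepest_isSome _ _ _ _).mpr
            ⟨q.1, PySem.List.mem_pyRange_one.mpr ⟨hq0, hq1⟩, by rw [hqc] at hq4; exact hq4⟩
        rw [h] at this; simp at this
      | some d => exact ⟨d, rfl⟩
    have hm2dd : m2 = dd := by rw [← hcm, hdd]; rfl
    obtain ⟨⟨hd0, hd1, hd2⟩, _⟩ := pv_deepest_some g _ _ _ dd hdd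
    have hddcell : (dd, c) ∈ pvCells g :=
      (pv_mem_cells g hrect (dd, c)).mpr ⟨hd0, hd1, by rw [← hqc]; exact hq2, by rw [← hqc]; exact hq3, hd2⟩
    have hddL1 : dd ∈ L1 := by
      rw [hL1]
      exact List.mem_map.mpr ⟨(dd, c), List.mem_filter.mpr ⟨hddcell, hcpb⟩, rfl⟩
    have := PySem.List.max?_isMax hm1 dd hddL1
    omega
  omega

-- the pushed target set of the extension equals B's pull-style rebuild

theorem pv_pull (g : List (List Int))
    (hrect : ∀ row ∈ g, row.length = (g.headD []).length)
    (pb : Int → Bool) (d lo hi : Int) :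
    (PySem.List.enumerate g).map (fun rr => (PySem.List.enumerate rr.2).map (fun cv =>
        if (PySem.Set.ofList (((pvCells g).filter (fun p =>
            pb p.2 && decide (lo < p.1) && decide (p.1 ≤ hi) &&
            decide (0 ≤ p.2 + d) && decide (p.2 + d < ((g.headD []).length : Int)))).map
              (fun p => (p.1, p.2 + d)))).contains (rr.1, cv.1) = true then 9 else cv.2))
    = (PySem.List.enumerate g).map (fun rr =>
        if decide (lo < rr.1) && decide (rr.1 ≤ hi) then
          (PySem.List.enumerate rr.2).map (fun cv =>
            if decide (0 ≤ cv.1 - d) && decide (cv.1 - d < ((g.headD []).length : Int))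
               && pb (cv.1 - d) && (PySem.List.pyGetD rr.2 (cv.1 - d) 0 == pvFg g)
            then 9 else cv.2)
        else rr.2) := by
  set cols : Int := ((g.headD []).length : Int) with hcols
  have hmemT : ∀ q : Int × Int,
      (PySem.Set.ofList (((pvCells g).filter (fun p =>
          pb p.2 && decide (lo < p.1) && decide (p.1 ≤ hi) &&
          decide (0 ≤ p.2 + d) && decide (p.2 + d < cols))).map
            (fun p => (p.1, p.2 + d)))).contains q = true ↔
      ∃ p ∈ pvCells g, pb p.2 = true ∧ lo < p.1 ∧ p.1 ≤ hi ∧ 0 ≤ p.2 + d ∧ p.2 + d < cols ∧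
        q = (p.1, p.2 + d) := by
    intro q
    show List.contains _ _ = true ↔ _
    rw [List.contains_iff_mem, PySem.Set.mem_ofList, List.mem_map]
    constructor
    · rintro ⟨p, hp, hq⟩
      rcases List.mem_filter.mp hp with ⟨hpc, hcond⟩
      simp only [Bool.and_eq_true, decide_eq_true_eq] at hcond
      exact ⟨p, hpc, hcond.1.1.1.1, hcond.1.1.1.2, hcond.1.1.2, hcond.1.2, hcond.2, hq.symm⟩
    · rintro ⟨p, hpc, h1, h2, h3, h4, h5, hq⟩
      refine ⟨p, List.mem_filter.mpr ⟨hpc, ?_⟩, hq.symm⟩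
      simp only [Bool.and_eq_true, decide_eq_true_eq]
      exact ⟨⟨⟨⟨h1, h2⟩, h3⟩, h4⟩, h5⟩
  apply List.map_congr_left
  intro rr hrr
  rcases pv_mem_enumerate ([] : List Int) hrr with ⟨hr0, hr1, hr2⟩
  have hrowlen : (rr.2.length : Int) = cols := by
    have hrow : rr.2 ∈ g := by
      rw [hr2, PySem.List.pyGetD_eq_getElem g [] hr0 hr1]
      exact List.getElem_mem _
    rw [hcols]
    exact_mod_cast hrect rr.2 hrow
  by_cases hband : lo < rr.1 ∧ rr.1 ≤ hi
  · rw [if_pos (by simp [hband.1, hband.2])]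
    apply List.map_congr_left
    intro cv hcv
    rcases pv_mem_enumerate (0 : Int) hcv with ⟨hc0, hc1, hc2⟩
    by_cases hT : (PySem.Set.ofList (((pvCells g).filter (fun p =>
          pb p.2 && decide (lo < p.1) && decide (p.1 ≤ hi) &&
          decide (0 ≤ p.2 + d) && decide (p.2 + d < cols))).map
            (fun p => (p.1, p.2 + d)))).contains (rr.1, cv.1) = true
    · rw [if_pos hT]
      rcases (hmemT _).mp hT with ⟨p, hpc, hpb, _, _, _, _, hq⟩
      have hq1 : rr.1 = p.1 := congrArg Prod.fst hq
      have hq2 : cv.1 = p.2 + d := congrArg Prod.snd hq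
      rcases (pv_mem_cells g hrect p).mp hpc with ⟨_, _, hp2, hp3, hp4⟩
      rw [if_pos ?_]
      simp only [Bool.and_eq_true, decide_eq_true_eq, beq_iff_eq]
      refine ⟨⟨⟨by omega, by omega⟩, by rw [show cv.1 - d = p.2 from by omega]; exact hpb⟩, ?_⟩
      rw [show cv.1 - d = p.2 from by omega, hr2, hq1]
      exact hp4
    · rw [if_neg hT, if_neg ?_]
      intro hcond
      simp only [Bool.and_eq_true, decide_eq_true_eq, beq_iff_eq] at hcond
      obtain ⟨⟨⟨hs0, hs1⟩, hspb⟩, hsfg⟩ := hcond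
      apply hT
      apply (hmemT _).mpr
      refine ⟨(rr.1, cv.1 - d), ?_, hspb, hband.1, hband.2, by omega, ?_, by ext <;> simp <;> omega⟩
      · apply (pv_mem_cells g hrect _).mpr
        refine ⟨hr0, hr1, hs0, hs1, ?_⟩
        rw [← hr2]
        exact hsfg
      · show cv.1 - d + d < cols
        have : cv.1 < cols := by rw [← hrowlen]; exact hc1
        omega
  · rw [if_neg (by
      intro h
      simp only [Bool.and_eq_true, decide_eq_true_eq] at h
      exact hband h)]
    have hnone : ∀ cv ∈ PySem.List.enumerate rr.2,
        (if (PySem.Set.ofList (((pvCells g).filter (fun p =>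
            pb p.2 && decide (lo < p.1) && decide (p.1 ≤ hi) &&
            decide (0 ≤ p.2 + d) && decide (p.2 + d < cols))).map
              (fun p => (p.1, p.2 + d)))).contains (rr.1, cv.1) = true then (9 : Int) else cv.2) = cv.2 := by
      intro cv _
      rw [if_neg ?_]
      intro hT
      rcases (hmemT _).mp hT with ⟨p, _, _, h1, h2, _, _, hq⟩
      have : rr.1 = p.1 := congrArg Prod.fst hq
      exact hband ⟨by omega, by omega⟩
    rw [List.map_congr_left hnone]
    exact PySem.List.map_snd_enumerate rr.2 0

-- the cells of pvCells lie inside the grid's rows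

theorem pv_cells_bounds (g : List (List Int))
    (hrect : ∀ row ∈ g, row.length = (g.headD []).length) :
    ∀ p ∈ pvCells g, 0 ≤ p.1 ∧ p.1 < (g.length : Int) := by
  intro p hp
  rcases (pv_mem_cells g hrect p).mp hp with ⟨h0, h1, _⟩
  exact ⟨h0, h1⟩

-- the main equivalence

theorem pv_main (g : List (List Int)) (hpre : Pre_transform g) :
    transform g = transform_alt g := by
  obtain ⟨hne, hrect, hr0, hcolors, hcols2⟩ := hpre
  have hcs_pair : (pvCols g).Pairwise (· < ·) := PySem.List.sorted_ofList_pairwise_lt _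
  have hcs_nodup : (pvCols g).Nodup := hcs_pair.imp (fun h => ne_of_lt h)
  have hcs_len : 2 ≤ (pvCols g).length := hcols2
  have hcs_ne : (pvCols g) ≠ [] := by
    intro h; rw [h] at hcs_len; simp at hcs_len
  set cs := pvCols g with hcsdef
  have hmono : ∀ (i j : Nat) (hi : i < cs.length) (hj : j < cs.length), i < j → cs[i] < cs[j] :=
    fun i j hi hj hij => List.pairwise_iff_getElem.mp hcs_pair i j hi hj hij
  set n : Int := (cs.length : Int) - 1 with hn
  have hn1 : 1 ≤ n := by omega
  set Y : Int := (PySem.List.pyRange 1 n).foldl (fun b i =>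
    if (PySem.List.pyGetD cs (b + 1) 0 - PySem.List.pyGetD cs b 0) <
       (PySem.List.pyGetD cs (i + 1) 0 - PySem.List.pyGetD cs i 0) then i else b) 0 with hY
  have hmaxY : PySem.List.max? (PySem.List.pyRange 0 n)
      (fun i => PySem.List.pyGetD cs (i + 1) 0 - PySem.List.pyGetD cs i 0) = some Y := by
    rw [PySem.List.pyRange_one_cons (by omega : (0:Int) < n)]
    exact pv_max?_cons _ 0 _
  have hYmem : Y ∈ PySem.List.pyRange 0 n := PySem.List.max?_mem hmaxY
  have hYb : 0 ≤ Y ∧ Y < n := PySem.List.mem_pyRange_one.mp hYmem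
  have hYS : Y = ((Y.toNat : Nat) : Int) := by omega
  set S : Nat := Y.toNat with hSdef
  have hSlen : S + 1 < cs.length := by omega
  have hfoldA : (PySem.List.pyRange 0 n).foldl (fun ms i =>
      if (PySem.List.pyGetD cs (i + 1) 0 - PySem.List.pyGetD cs i 0) > ms.1
      then (PySem.List.pyGetD cs (i + 1) 0 - PySem.List.pyGetD cs i 0, i) else ms) (-1, 0)
      = (PySem.List.pyGetD cs (Y + 1) 0 - PySem.List.pyGetD cs Y 0, Y) := by
    rw [PySem.List.pyRange_one_cons (by omega : (0:Int) < n), List.foldl_cons]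
    have hkey0 : PySem.List.pyGetD cs (0 + 1) 0 - PySem.List.pyGetD cs 0 0 > (-1 : Int) := by
      have h1 : PySem.List.pyGetD cs (0 + 1) 0 = cs[1]'(by omega) := by
        rw [PySem.List.pyGetD_eq_getElem cs 0 (by omega) (by push_cast; omega)]
        simp
      have h0 : PySem.List.pyGetD cs 0 0 = cs[0]'(by omega) := by
        rw [PySem.List.pyGetD_eq_getElem cs 0 (by omega) (by push_cast; omega)]
        simp
      have := hmono 0 1 (by omega) (by omega) (by omega)
      rw [h1, h0]
      omega
    rw [if_pos hkey0]
    exact pv_argmax_foldl (fun i => PySem.List.pyGetD cs (i + 1) 0 - PySem.List.pyGetD cs i 0)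
      (PySem.List.pyRange 1 n) 0
  have hgetY : PySem.List.pyGetD cs Y 0 = cs[S]'(by omega) := by
    rw [PySem.List.pyGetD_eq_getElem cs 0 (by omega) (by push_cast; omega)]
  have hgetY1 : PySem.List.pyGetD cs (Y + 1) 0 = cs[S + 1]'(by omega) := by
    rw [PySem.List.pyGetD_eq_getElem cs 0 (by omega) (by push_cast; omega)]
    simp only [show (Y + 1).toNat = S + 1 from by omega]
  have hslice_l : PySem.List.slice cs none (some (Y + 1)) = cs.take (S + 1) := by
    rw [PySem.List.slice_to cs (by omega : (0:Int) ≤ Y + 1)]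
    simp only [show (Y + 1).toNat = S + 1 from by omega]
  have hslice_r : PySem.List.slice cs (some (Y + 1)) none = cs.drop (S + 1) := by
    rw [PySem.List.slice_from cs (by omega : (0:Int) ≤ Y + 1)]
    simp only [show (Y + 1).toNat = S + 1 from by omega]
  have hofl_l : PySem.Set.ofList (cs.take (S + 1)) = cs.take (S + 1) :=
    pv_ofList_eq_self _ (hcs_nodup.sublist (List.take_sublist _ _))
  have hofl_r : PySem.Set.ofList (cs.drop (S + 1)) = cs.drop (S + 1) :=
    pv_ofList_eq_self _ (hcs_nodup.sublist (List.drop_sublist _ _))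
  have hsnd_cs : ∀ p ∈ pvCells g, p.2 ∈ cs := by
    intro p hp
    rw [hcsdef]
    unfold pvCols
    rw [PySem.List.mem_sorted, PySem.Set.mem_ofList]
    exact List.mem_map.mpr ⟨p, hp, rfl⟩
  have hfil_l : (pvCells g).filter (fun p => PySem.Set.contains (cs.take (S + 1)) p.2)
      = (pvCells g).filter (fun p => decide (p.2 ≤ PySem.List.pyGetD cs Y 0)) := by
    apply List.filter_congr
    intro p hp
    rw [Bool.eq_iff_iff]
    rw [decide_eq_true_eq, hgetY]
    show List.contains _ _ = true ↔ _
    rw [List.contains_iff_mem]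
    exact pv_mem_take_iff cs hcs_pair S (by omega) p.2 (hsnd_cs p hp)
  have hfil_r : (pvCells g).filter (fun p => PySem.Set.contains (cs.drop (S + 1)) p.2)
      = (pvCells g).filter (fun p => decide (PySem.List.pyGetD cs Y 0 < p.2)) := by
    apply List.filter_congr
    intro p hp
    rw [Bool.eq_iff_iff]
    rw [decide_eq_true_eq, hgetY]
    show List.contains _ _ = true ↔ _
    rw [List.contains_iff_mem]
    exact pv_mem_drop_iff cs hcs_pair S (by omega) p.2 (hsnd_cs p hp)
  have hanch_l : (PySem.List.min? (cs.take (S + 1)) (fun x => x)).getD 0 = cs.headD 0 :=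
    pv_min_take cs hcs_pair S hcs_ne
  have hanch_r : (PySem.List.min? (cs.drop (S + 1)) (fun x => x)).getD 0
      = PySem.List.pyGetD cs (Y + 1) 0 := by
    rw [pv_min_drop cs hcs_pair S hSlen, hgetY1]
  have hget0 : PySem.List.pyGetD cs 0 0 = cs.headD 0 := pv_pyGetD_zero cs 0
  have hmem_cs_iff : ∀ c : Int, c ∈ cs ↔ c ∈ (pvCells g).map (fun p => p.2) := by
    intro c
    rw [hcsdef]
    unfold pvCols
    rw [PySem.List.mem_sorted, PySem.Set.mem_ofList]
  have hhead0 : cs.headD 0 = cs[0]'(by omega) := by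
    rcases List.exists_cons_of_ne_nil hcs_ne with ⟨c0, t, h⟩
    simp [h]
  have hex_l : ∃ p ∈ pvCells g, decide (p.2 ≤ PySem.List.pyGetD cs Y 0) = true := by
    have : cs.headD 0 ∈ cs := by rw [hhead0]; exact List.getElem_mem _
    rcases List.mem_map.mp ((hmem_cs_iff _).mp this) with ⟨p, hp, hpc⟩
    refine ⟨p, hp, ?_⟩
    rw [decide_eq_true_eq, hpc, hgetY, hhead0]
    rcases Nat.eq_zero_or_pos S with h0 | h0
    · simp only [h0]; omega
    · exact le_of_lt (hmono 0 S (by omega) (by omega) h0)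
  have hex_r : ∃ p ∈ pvCells g, decide (PySem.List.pyGetD cs Y 0 < p.2) = true := by
    have : cs[S + 1]'(by omega) ∈ cs := List.getElem_mem _
    rcases List.mem_map.mp ((hmem_cs_iff _).mp this) with ⟨p, hp, hpc⟩
    refine ⟨p, hp, ?_⟩
    rw [decide_eq_true_eq, hpc, hgetY]
    exact hmono S (S + 1) (by omega) (by omega) (by omega)
  have harm : ∀ (pb : Int × Int → Bool), (∃ p ∈ pvCells g, pb p = true) →
      0 ≤ (PySem.List.max? (((pvCells g).filter pb).map (fun x => x.1)) (fun x => x)).getD 0 ∧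
      (PySem.List.max? (((pvCells g).filter pb).map (fun x => x.1)) (fun x => x)).getD 0 < (g.length : Int) := by
    intro pb hex
    rcases hex with ⟨p, hp, hpb⟩
    have hmaxmem : ∀ (L : List Int), L ≠ [] → ((PySem.List.max? L (fun x => x)).getD 0) ∈ L := by
      intro L hL
      cases h : PySem.List.max? L (fun x => x) with
      | none => exact absurd ((PySem.List.max?_eq_none_iff _ _).mp h) hL
      | some m => simpa using PySem.List.max?_mem h
    have hne' : ((pvCells g).filter pb).map (fun x => x.1) ≠ [] := by
      have : p ∈ (pvCells g).filter pb := List.mem_filter.mpr ⟨hp, hpb⟩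
      intro h
      rw [List.map_eq_nil_iff] at h
      rw [h] at this
      simp at this
    rcases List.mem_map.mp (hmaxmem _ hne') with ⟨q, hq, hqm⟩
    have := pv_cells_bounds g hrect q (List.mem_of_mem_filter hq)
    rw [← hqm]
    exact this
  have harm_l := harm _ hex_l
  have harm_r := harm _ hex_r
  have hrectI : ∀ row ∈ g, (row.length : Int) = (((g.headD []).length : Nat) : Int) := by
    intro row hr
    exact_mod_cast hrect row hr
  -- B's zip max equals the pair at the argmax gap index
  have hpairB : (PySem.List.max? (List.zip cs (cs.drop 1)) (fun p => p.2 - p.1)).getD (0, 0)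
      = (PySem.List.pyGetD cs Y 0, PySem.List.pyGetD cs (Y + 1) 0) := by
    rw [pv_zip_eq cs hcs_len, pv_max?_map, ← hn, hmaxY]
    rfl
  -- B's arm maxima equal A's
  have hmaxmax_l := pv_maxmax g hrect (fun c => decide (c ≤ PySem.List.pyGetD cs Y 0)) hex_l
  have hmaxmax_r := pv_maxmax g hrect (fun c => decide (PySem.List.pyGetD cs Y 0 < c)) hex_r
  -- now rewrite both ports to the shared canonical pieces
  unfold transform transform_alt
  dsimp only
  rw [pv_counts_eq g hrect]
  rw [show (PySem.List.pyGetD (PySem.List.sorted (PySem.Dict.counter g.flatten).items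
      (fun p => p.2) true) 0 ((0 : Int), (0 : Int))).1 = pvBg g from rfl]
  rw [show PySem.List.pyGetD ((PySem.Dict.counter g.flatten).keys.filter
      (fun c => decide (c ≠ pvBg g))) 0 0 = pvFg g from by rw [pv_filter_head_find]; rfl]
  rw [pv_fgcells_eq' g hrect]
  rw [show PySem.List.sorted (PySem.Set.ofList ((pvCells g).map (fun x => x.2))) (fun x => x) false
      = pvCols g from rfl]
  rw [show PySem.List.pyGetD g 0 [] = g.headD [] from pv_pyGetD_zero g []]
  rw [pv_cols_eq g hrect]
  rw [show PySem.List.slice (pvCols g) (some 1) none = (pvCols g).drop 1 from by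
    rw [PySem.List.slice_from (pvCols g) (by omega : (0:Int) ≤ 1)]; rfl]
  rw [← hcsdef, ← hn]
  rw [hfoldA, hpairB]
  rw [show ((PySem.List.pyGetD cs (Y + 1) 0 - PySem.List.pyGetD cs Y 0, Y) : Int × Int).2 = Y from rfl]
  rw [show ((PySem.List.pyGetD cs Y 0, PySem.List.pyGetD cs (Y + 1) 0) : Int × Int).1
      = PySem.List.pyGetD cs Y 0 from rfl]
  rw [show ((PySem.List.pyGetD cs Y 0, PySem.List.pyGetD cs (Y + 1) 0) : Int × Int).2
      = PySem.List.pyGetD cs (Y + 1) 0 from rfl]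
  rw [hslice_l, hslice_r, hofl_l, hofl_r, hfil_l, hfil_r, hanch_l, hanch_r, hget0]
  rw [← hmaxmax_l, ← hmaxmax_r]
  set LM : Int := (PySem.List.max? (((pvCells g).filter
      (fun p => decide (p.2 ≤ PySem.List.pyGetD cs Y 0))).map (fun x => x.1)) (fun x => x)).getD 0 with hLMdef
  set RM : Int := (PySem.List.max? (((pvCells g).filter
      (fun p => decide (PySem.List.pyGetD cs Y 0 < p.2))).map (fun x => x.1)) (fun x => x)).getD 0 with hRMdef
  rcases lt_trichotomy LM RM with hlt | heq | hgt
  · rw [if_pos hlt, if_neg (by omega : ¬ LM = RM), if_pos hlt]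
    rw [pv_extend g (((g.headD []).length : Nat) : Int) hrectI
      (fun c => decide (PySem.List.pyGetD cs Y 0 < c)) (pvCells g)
      (cs.headD 0) (PySem.List.pyGetD cs (Y + 1) 0)
      (cs.headD 0 - PySem.List.pyGetD cs (Y + 1) 0) LM RM rfl harm_l.1 harm_r.2]
    exact pv_pull g hrect (fun c => decide (PySem.List.pyGetD cs Y 0 < c))
      (cs.headD 0 - PySem.List.pyGetD cs (Y + 1) 0) LM RM
  · rw [if_neg (by omega : ¬ LM < RM), if_neg (by omega : ¬ RM < LM), if_pos heq]
    simp
  · rw [if_neg (by omega : ¬ LM < RM), if_pos hgt, if_neg (by omega : ¬ LM = RM),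
        if_neg (by omega : ¬ LM < RM)]
    rw [pv_extend g (((g.headD []).length : Nat) : Int) hrectI
      (fun c => decide (c ≤ PySem.List.pyGetD cs Y 0)) (pvCells g)
      (PySem.List.pyGetD cs (Y + 1) 0) (cs.headD 0)
      (PySem.List.pyGetD cs (Y + 1) 0 - cs.headD 0) RM LM rfl harm_r.1 harm_l.2]
    exact pv_pull g hrect (fun c => decide (c ≤ PySem.List.pyGetD cs Y 0))
      (PySem.List.pyGetD cs (Y + 1) 0 - cs.headD 0) RM LM

-- ===== VERDICT (by name: the statement is the Claim_ definition above) =====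
theorem transform_spec : Claim_equal_transform := by
  intro input_grid _ hpre
  show transform input_grid = transform_alt input_grid
  exact pv_main input_grid hpre
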